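-- pv_equiv track=rewrite | github.com/silashoevers/advent-of-code | 2015/01_not_quite_lisp/aoc201501.py | part1
-- ===== SOURCE A (Python) =====
-- def part1(data):
--     """Solve part 1"""
--     floor = 0
--     for instruction in data:
--         if instruction == "(":
--             floor += 1  # Go up a floor
--         elif instruction == ")":
--             floor -= 1  # Go down a floor
--     return floor
-- ===== SOURCE B (Python) =====
-- def part1(data):
--     """Solve part 1"""
--     return data.count("(") - data.count(")")
-- ===== Notes on version B (the rewrite author's own statement) =====
-- stated objective: idiomatic
-- what changed: Replaces the accumulating per-character for-loop with two library str.count scans subtracted, maintaining no running accumulator.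
import Mathlib
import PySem

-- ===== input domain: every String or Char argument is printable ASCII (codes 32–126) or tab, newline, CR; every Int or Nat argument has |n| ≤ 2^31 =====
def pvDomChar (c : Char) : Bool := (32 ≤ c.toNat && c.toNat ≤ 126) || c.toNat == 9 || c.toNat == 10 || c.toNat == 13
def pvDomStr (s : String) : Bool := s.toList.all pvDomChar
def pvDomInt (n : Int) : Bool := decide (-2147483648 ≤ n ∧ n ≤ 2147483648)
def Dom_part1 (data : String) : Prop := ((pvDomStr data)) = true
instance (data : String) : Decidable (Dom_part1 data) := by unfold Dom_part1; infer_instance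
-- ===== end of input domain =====

-- B replaces A's accumulating for-loop with the idiomatic two-scan one-liner data.count("(") - data.count(")").


-- ===== PORT A =====
-- floor = 0; for instruction in data: if '(' then +1 elif ')' then -1; return floor
def part1 (data : String) : Int :=
  data.toList.foldl
    (fun floor instruction =>
      if instruction = '(' then floor + 1
      else if instruction = ')' then floor - 1
      else floor) 0

-- ===== PORT B =====
-- return data.count("(") - data.count(")")
def part1_alt (data : String) : Int :=
  (PySem.Str.count data "(" : Int) - (PySem.Str.count data ")" : Int)

-- ===== PRECONDITION & SPEC =====
def Spec_part1 (data : String) (out : Int) : Prop := out = part1_alt data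
instance (data : String) (out : Int) : Decidable (Spec_part1 data out) := by unfold Spec_part1; infer_instance

-- ===== CLAIM (what is proved, stated in full; the proofs are below) =====
def Claim_equal_part1 : Prop := ∀ (data : String), Dom_part1 data → Spec_part1 data (part1 data)

-- ===== LEMMAS AND PROOFS =====

-- str.count with a single-character needle is the character count of the list
theorem chars_count_go_single (c : Char) (l : List Char) (fuel acc : Nat) (h : l.length ≤ fuel) :
    PySem.Chars.count.go [c] fuel l acc = acc + l.count c := by
  induction l generalizing fuel acc with
  | nil => cases fuel <;> simp [PySem.Chars.count.go]
  | cons x t ih =>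
    cases fuel with
    | zero => simp at h
    | succ n =>
      simp at h
      rw [PySem.Chars.count.go]
      simp only [List.isPrefixOf, List.length]
      by_cases hc : x = c
      · subst hc
        simp [ih _ _ h]
        omega
      · simp [hc, Ne.symm hc, ih _ _ h]

theorem chars_count_single (cs : List Char) (c : Char) :
    PySem.Chars.count cs [c] = cs.count c := by
  simp [PySem.Chars.count, chars_count_go_single c cs cs.length 0 le_rfl]

-- A's loop, started at any accumulator, adds the net count
theorem foldl_net (l : List Char) (a : Int) :
    l.foldl (fun floor instruction =>
      if instruction = '(' then floor + 1
      else if instruction = ')' then floor - 1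
      else floor) a = a + (l.count '(' : Int) - (l.count ')' : Int) := by
  induction l generalizing a with
  | nil => simp
  | cons x t ih =>
    simp only [List.foldl, List.count_cons, ih]
    by_cases h1 : x = '('
    · simp [h1]; ring
    · by_cases h2 : x = ')'
      · simp [h2]; ring
      · simp [h1, h2]

-- ===== VERDICT (by name: the statement is the Claim_ definition above) =====
theorem part1_spec : Claim_equal_part1 := by
  intro data _
  unfold Spec_part1 part1 part1_alt
  rw [foldl_net]
  have h1 : PySem.Str.count data "(" = data.toList.count '(' := by
    rw [PySem.Str.count_eq, show ("(" : String).toList = ['('] from rfl, chars_count_single]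
  have h2 : PySem.Str.count data ")" = data.toList.count ')' := by
    rw [PySem.Str.count_eq, show (")" : String).toList = [')'] from rfl, chars_count_single]
  rw [h1, h2]; ring
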